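-- pv_equiv track=rewrite | github.com/JoshuaAtherton/School-Projects | python/p2 napier numbers/joshua9_project2.py | convertNumberNapier
-- ===== SOURCE A (Python) =====
-- napierNumber = ['a', 'b', 'c', 'd', 'e', 'f', 'g', 'h', 'i', 'j', 'k',
--                 'l', 'm', 'n', 'o', 'p', 'q', 'r', 's', 't', 'u', 'v',
--                 'w', 'x', 'y', 'z']
--
-- numberList = [1, 2, 4, 8, 16, 32, 64, 128, 256, 512, 1024, 2048, 4096, 8192,
--           16384, 32768, 65536, 131072, 262144,524288, 1048576, 2097152,
--           4194304, 8388608, 16777216, 33554432 ]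
--
-- def convertNumberNapier(number): #converts number to napier
--     napierList = []
--     index = 0
--     negativeNumber = False
--     if number < 0:
--         number = number * -1
--         negativeNumber = True
--     number = number
--     while number != 0:
--         newNumber = number // 2
--         numberRemainder = number % 2
--         letter = numberRemainder * numberList[index]
--         if letter != 0:
--             napierList.append(napierNumber[index])
--         index += 1
--         number = newNumber
--     joined = ''.join(napierList)
--     if len(joined) == 0:
--         return ("''")
--     elif negativeNumber == True:
--         return '-' + joined
--     else:
--         return joined
-- ===== SOURCE B (Python) =====
-- napierNumber = ['a', 'b', 'c', 'd', 'e', 'f', 'g', 'h', 'i', 'j', 'k',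
--                 'l', 'm', 'n', 'o', 'p', 'q', 'r', 's', 't', 'u', 'v',
--                 'w', 'x', 'y', 'z']
--
-- def convertNumberNapier(number):
--     # Greedy subtraction of the largest power of two (MSB-first), then reverse.
--     n = abs(number)
--     letters = []
--     while n:
--         i = n.bit_length() - 1          # position of the highest set bit
--         letters.append(napierNumber[i])
--         n -= 1 << i
--     if not letters:
--         return "''"
--     s = ''.join(reversed(letters))
--     return '-' + s if number < 0 else s
-- ===== Notes on version B (the rewrite author's own statement) =====
-- stated objective: alternative
-- what changed: B replaces A's LSB-first halving/remainder loop (with its parallel powers-of-two table) by a greedy MSB-first algorithm: repeatedly subtract the largest power of two (found via bit_length), collecting letters high-to-low, then reverse.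
import Mathlib
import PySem

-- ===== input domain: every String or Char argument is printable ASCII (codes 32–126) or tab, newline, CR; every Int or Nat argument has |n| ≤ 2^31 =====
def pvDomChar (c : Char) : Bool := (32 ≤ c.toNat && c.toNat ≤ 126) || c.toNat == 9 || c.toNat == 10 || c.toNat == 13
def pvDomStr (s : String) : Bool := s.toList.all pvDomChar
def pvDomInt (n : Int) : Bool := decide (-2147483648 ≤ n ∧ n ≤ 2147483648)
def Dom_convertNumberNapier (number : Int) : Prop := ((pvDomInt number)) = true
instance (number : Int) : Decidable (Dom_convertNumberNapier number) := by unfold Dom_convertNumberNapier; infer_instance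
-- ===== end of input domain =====

-- B replaces A's LSB-first divide-by-2 loop (with its parallel powers-of-two table) by a
-- greedy MSB-first algorithm: subtract the largest power of two repeatedly, then reverse.

-- ===== PORT A =====
def napierNumberL : List String :=
  ["a","b","c","d","e","f","g","h","i","j","k","l","m","n","o","p","q","r","s","t","u","v","w","x","y","z"]

def numberListL : List Int :=
  [1, 2, 4, 8, 16, 32, 64, 128, 256, 512, 1024, 2048, 4096, 8192,
   16384, 32768, 65536, 131072, 262144, 524288, 1048576, 2097152,
   4194304, 8388608, 16777216, 33554432]

-- the while-loop of A; `number` is nonnegative there (abs was taken), so it is carried as a Nat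
-- and `// 2` / `% 2` are Nat division/remainder (exact for nonnegative Python ints).
def aLoop : Nat → Int → List String → List String
  | 0, _, acc => acc          -- while-condition `number != 0` fails
  | (n+1), index, acc =>
    match PySem.List.pyGet? numberListL index, PySem.List.pyGet? napierNumberL index with
    | some nl, some nn =>
        let newNumber := (n+1) / 2
        let numberRemainder := (n+1) % 2
        let letter := (numberRemainder : Int) * nl
        let acc' := if letter ≠ 0 then acc ++ [nn] else acc
        aLoop newNumber (index + 1) acc'
    | _, _ => acc             -- Python raises IndexError here; excluded by Pre_
termination_by n _ _ => n
decreasing_by omega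

def convertNumberNapier (number : Int) : String :=
  let negativeNumber : Bool := number < 0
  -- `if number < 0: number = number * -1`: the loop then runs on |number| = number.natAbs
  let napierList := aLoop number.natAbs 0 []
  let joined := PySem.Str.join "" napierList
  if PySem.Str.len joined = 0 then "''"
  else if negativeNumber = true then "-" ++ joined
  else joined

-- ===== PORT B =====
-- n.bit_length() for n : Nat (Python's int.bit_length on a nonnegative int)
def bitLen : Nat → Nat
  | 0 => 0
  | (n+1) => bitLen ((n+1)/2) + 1
termination_by n => n
decreasing_by omega

-- the while-loop of B: peel the highest set bit, collecting letters high-to-low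
def bLoop (n : Nat) (acc : List String) : List String :=
  if _h : n = 0 then acc
  else
    let i := bitLen n - 1
    match PySem.List.pyGet? napierNumberL (i : Int) with
    | some l => bLoop (n - 2 ^ i) (acc ++ [l])   -- n -= 1 << i
    | none => acc            -- Python raises IndexError here; excluded by Pre_
termination_by n
decreasing_by
  have : 1 ≤ 2 ^ (bitLen n - 1) := Nat.one_le_two_pow
  omega

def convertNumberNapier_alt (number : Int) : String :=
  let letters := bLoop number.natAbs []
  if letters = [] then "''"
  else
    let s := PySem.Str.join "" letters.reverse   -- ''.join(reversed(letters))
    if number < 0 then "-" ++ s else s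

-- ===== PRECONDITION & SPEC =====
-- Pre_ excludes |number| ≥ 2^26, where A raises IndexError (its letter table has 26 entries).
def Pre_convertNumberNapier (number : Int) : Prop := number.natAbs < 67108864
instance (number : Int) : Decidable (Pre_convertNumberNapier number) := by
  unfold Pre_convertNumberNapier; infer_instance
def pvWitness_convertNumberNapier : Int := (5)

def Spec_convertNumberNapier (number : Int) (out : String) : Prop := out = convertNumberNapier_alt number
instance (number : Int) (out : String) : Decidable (Spec_convertNumberNapier number out) := by unfold Spec_convertNumberNapier; infer_instance

-- ===== CLAIM (what is proved, stated in full; the proofs are below) =====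
def Claim_equal_convertNumberNapier : Prop := ∀ (number : Int), Dom_convertNumberNapier number → Pre_convertNumberNapier number → Spec_convertNumberNapier number (convertNumberNapier number)

-- ===== LEMMAS AND PROOFS =====

-- canonical letter list: the letters of the set bits of n, starting at bit position i
def pvLetters : Nat → Nat → List String
  | 0, _ => []
  | (n+1), i =>
      (if (n+1) % 2 = 1 then [napierNumberL.getD i ""] else []) ++ pvLetters ((n+1)/2) (i+1)
termination_by n _ => n
decreasing_by omega

lemma pow_bound {n i : Nat} (h : n + 1 < 2 ^ (26 - i)) : i < 26 := by
  by_contra hc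
  simp [Nat.sub_eq_zero_of_le (by omega : 26 ≤ i)] at h

lemma pow_bound_step {n i : Nat} (h : n + 1 < 2 ^ (26 - i)) : (n+1)/2 < 2 ^ (26 - (i+1)) := by
  have hi := pow_bound h
  have : 2 ^ (26 - i) = 2 ^ (26 - (i+1)) * 2 := by
    rw [← pow_succ]; congr 1; omega
  rw [Nat.div_lt_iff_lt_mul (by norm_num)]
  omega

-- A's loop produces exactly the canonical letter list
lemma aLoop_eq (n : Nat) : ∀ (i : Nat) (acc : List String), n < 2 ^ (26 - i) →
    aLoop n (i : Int) acc = acc ++ pvLetters n i := by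
  induction n using Nat.strong_induction_on with
  | _ n ih =>
    intro i acc h
    match n with
    | 0 => simp [aLoop, pvLetters]
    | (m+1) =>
      have hi : i < 26 := pow_bound h
      have h26 : i < napierNumberL.length := by simpa [napierNumberL] using hi
      have h26' : i < numberListL.length := by simpa [numberListL] using hi
      have hpos : (0:Int) < numberListL[i] := by
        have hall : numberListL.all (fun x => decide (0 < x)) = true := by decide
        have := List.all_eq_true.mp hall _ (List.getElem_mem h26')
        simpa using this
      have hget1 : PySem.List.pyGet? numberListL (i : Int) = some numberListL[i] := by
        rw [PySem.List.pyGet?_natCast]; exact List.getElem?_eq_getElem h26'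
      have hget2 : PySem.List.pyGet? napierNumberL (i : Int) = some napierNumberL[i] := by
        rw [PySem.List.pyGet?_natCast]; exact List.getElem?_eq_getElem h26
      have hgd : napierNumberL.getD i "" = napierNumberL[i] := List.getD_eq_getElem _ _ h26
      have hrec := ih ((m+1)/2) (by omega) (i+1) (acc ++ (if (m+1) % 2 = 1 then [napierNumberL.getD i ""] else [])) (pow_bound_step h)
      push_cast at hrec
      rw [aLoop, hget1, hget2, pvLetters]
      by_cases hb : (m+1) % 2 = 1
      · rw [if_pos hb, hgd] at hrec
        simp only [List.append_assoc] at hrec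
        simp only [List.singleton_append] at hrec
        simp [hb, hpos.ne']
        rw [List.getElem?_eq_getElem h26, Option.getD_some]
        exact hrec
      · rw [if_neg hb] at hrec
        simp only [List.append_nil] at hrec
        have hInt : ¬ (((m:Int) + 1) % 2 = 1) := by omega
        simp [hb, hInt, hrec]

-- bit_length bounds: for n > 0, 2^(bitLen n - 1) ≤ n < 2^(bitLen n)
lemma bitLen_pos {n : Nat} (h : 0 < n) : 1 ≤ bitLen n := by
  match n with
  | (m+1) => rw [bitLen]; omega

lemma bitLen_bounds : ∀ n, 0 < n → 2 ^ (bitLen n - 1) ≤ n ∧ n < 2 ^ (bitLen n) := by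
  intro n
  induction n using Nat.strong_induction_on with
  | _ n ih =>
    intro hn
    match n with
    | (m+1) =>
      rw [bitLen]
      simp only [Nat.add_sub_cancel]
      by_cases h0 : (m+1)/2 = 0
      · have hm : m = 0 := by omega
        subst hm
        simp [h0, bitLen]
      · have hb1 : 1 ≤ bitLen ((m+1)/2) := bitLen_pos (by omega)
        obtain ⟨l, u⟩ := ih ((m+1)/2) (by omega) (by omega)
        have e1 : 2 ^ (bitLen ((m+1)/2)) = 2 * 2 ^ (bitLen ((m+1)/2) - 1) := by
          rw [← pow_succ']; congr 1; omega
        have e2 : 2 ^ (bitLen ((m+1)/2) + 1) = 2 * 2 ^ (bitLen ((m+1)/2)) := by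
          rw [← pow_succ']
        constructor <;> omega

-- peel the highest set bit: if 2^t ≤ n < 2^(t+1) then the letter list of n is that of
-- n - 2^t followed by the letter at position i+t
lemma pvLetters_peel : ∀ t i n, 2 ^ t ≤ n → n < 2 ^ (t+1) →
    pvLetters n i = pvLetters (n - 2 ^ t) i ++ [napierNumberL.getD (i+t) ""] := by
  intro t
  induction t with
  | zero =>
    intro i n h1 h2
    have h1' : 1 ≤ n := by simpa using h1
    have h2' : n < 2 := by simpa using h2
    have hn : n = 1 := by omega
    subst hn
    simp [pvLetters]
  | succ t iht =>
    intro i n h1 h2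
    have et : 2 ^ (t+1) = 2 * 2 ^ t := by rw [← pow_succ']
    have et2 : 2 ^ (t+1+1) = 2 * 2 ^ (t+1) := by rw [← pow_succ']
    obtain ⟨m, rfl⟩ : ∃ m, n = m + 1 := ⟨n - 1, by omega⟩
    · have hd1 : 2 ^ t ≤ (m+1)/2 := by omega
      have hd2 : (m+1)/2 < 2 ^ (t+1) := by omega
      have hrec := iht (i+1) ((m+1)/2) hd1 hd2
      rw [pvLetters, hrec]
      by_cases hz : m + 1 - 2 ^ (t+1) = 0
      · have hm : m + 1 = 2 ^ (t+1) := by omega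
        have hpar : ¬ ((m+1) % 2 = 1) := by omega
        have hhalf : (m+1)/2 - 2 ^ t = 0 := by omega
        rw [hz, hhalf]
        have hi : i + 1 + t = i + (t+1) := by omega
        simp [pvLetters, hpar, hi]
      · match h' : m + 1 - 2 ^ (t+1), hz with
        | (k+1), _ =>
          have hpar : (k+1) % 2 = (m+1) % 2 := by omega
          have hhalf : (k+1)/2 = (m+1)/2 - 2 ^ t := by omega
          rw [pvLetters, hpar, hhalf]
          have hi : i + 1 + t = i + (t+1) := by omega
          rw [hi]
          simp [List.append_assoc]

-- B's loop produces the canonical letter list reversed (after acc)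
lemma bLoop_eq (n : Nat) : n < 67108864 → ∀ acc, bLoop n acc = acc ++ (pvLetters n 0).reverse := by
  induction n using Nat.strong_induction_on with
  | _ n ih =>
    intro h acc
    by_cases h0 : n = 0
    · subst h0; rw [bLoop]; simp [pvLetters]
    · obtain ⟨l, u⟩ := bitLen_bounds n (by omega)
      set k := bitLen n - 1 with hk
      have hku : n < 2 ^ (k+1) := by
        have : bitLen n - 1 + 1 = bitLen n := by
          have := bitLen_pos (n := n) (by omega); omega
        rw [hk, this]; exact u
      have hk26 : k < 26 := by
        by_contra hc
        have h2k : (2:Nat) ^ 26 ≤ 2 ^ k := Nat.pow_le_pow_right (by norm_num) (by omega)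
        have h226 : (67108864:Nat) = 2 ^ 26 := by norm_num
        have : (67108864:Nat) ≤ n := by rw [h226]; exact le_trans h2k l
        omega
      have h26 : k < napierNumberL.length := by simpa [napierNumberL] using hk26
      have hget : PySem.List.pyGet? napierNumberL (k : Int) = some napierNumberL[k] := by
        rw [PySem.List.pyGet?_natCast]; exact List.getElem?_eq_getElem h26
      have hpk : 1 ≤ 2 ^ k := Nat.one_le_two_pow
      have hrec := ih (n - 2 ^ k) (by omega) (by omega) (acc ++ [napierNumberL[k]])
      have hpeel := pvLetters_peel k 0 n l hku
      rw [bLoop, dif_neg h0]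
      simp only [← hk, hget]
      rw [hrec, hpeel]
      have hgd : napierNumberL.getD (0+k) "" = napierNumberL[k] := by
        rw [Nat.zero_add]; exact List.getD_eq_getElem _ _ h26
      rw [hgd]
      simp

-- every letter emitted (inside Pre_) is a single character
lemma letters26 : ∀ i, i < 26 → (napierNumberL.getD i "").toList.length = 1 := by decide

lemma pvLetters_len1 (n : Nat) : ∀ i, n < 2 ^ (26 - i) →
    ∀ s ∈ pvLetters n i, s.toList.length = 1 := by
  induction n using Nat.strong_induction_on with
  | _ n ih =>
    intro i h s hs
    match n with
    | 0 => simp [pvLetters] at hs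
    | (m+1) =>
      rw [pvLetters] at hs
      rcases List.mem_append.mp hs with h1 | h2
      · have hi : i < 26 := pow_bound h
        by_cases hb : (m+1) % 2 = 1
        · rw [if_pos hb] at h1
          simp at h1
          subst h1
          exact letters26 i hi
        · rw [if_neg hb] at h1; simp at h1
      · exact ih ((m+1)/2) (by omega) (i+1) (pow_bound_step h) s h2

lemma flatten_intersperse_nil {α : Type} (xs : List (List α)) :
    (List.intersperse ([] : List α) xs).flatten = xs.flatten := by
  induction xs with
  | nil => simp
  | cons a tl ih =>
    cases tl with
    | nil => simp
    | cons b t =>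
      have he : List.intersperse ([] : List α) (a :: b :: t)
          = a :: [] :: List.intersperse [] (b :: t) := by
        simp [List.intersperse]
      rw [he]
      simp only [List.flatten_cons] at ih ⊢
      rw [ih]
      simp

lemma sum_len (L : List String) (h : ∀ s ∈ L, s.toList.length = 1) :
    (L.map (fun s => s.toList.length)).sum = L.length := by
  induction L with
  | nil => simp
  | cons a tl ih =>
    have ha : a.toList.length = 1 := h a (by simp)
    have ht := ih (fun s hs => h s (by simp [hs]))
    simp only [List.map_cons, List.sum_cons, List.length_cons]
    omega

lemma join_len (L : List String) (h : ∀ s ∈ L, s.toList.length = 1) :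
    PySem.Str.len (PySem.Str.join "" L) = (L.length : Int) := by
  rw [PySem.Str.len_eq, PySem.Str.toList_join]
  have hj : PySem.Chars.join "".toList (L.map String.toList) = (L.map String.toList).flatten := by
    simp [PySem.Chars.join, List.intercalate, flatten_intersperse_nil]
  rw [hj]
  congr 1
  rw [List.length_flatten, List.map_map]
  simpa [Function.comp] using sum_len L h

-- ===== VERDICT (by name: the statement is the Claim_ definition above) =====
theorem convertNumberNapier_spec : Claim_equal_convertNumberNapier := by
  intro number _ hpre
  have hA : aLoop number.natAbs 0 [] = pvLetters number.natAbs 0 := by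
    have := aLoop_eq number.natAbs 0 [] (by simpa using hpre)
    simpa using this
  have hB : bLoop number.natAbs [] = (pvLetters number.natAbs 0).reverse := by
    simpa using bLoop_eq number.natAbs hpre []
  have hlen := join_len (pvLetters number.natAbs 0)
    (pvLetters_len1 number.natAbs 0 (by simpa using hpre))
  show convertNumberNapier number = convertNumberNapier_alt number
  unfold convertNumberNapier convertNumberNapier_alt
  simp only [hA, hB, hlen, List.reverse_reverse, List.reverse_eq_nil_iff]
  by_cases hz : pvLetters number.natAbs 0 = []
  · simp [hz]
  · have : (pvLetters number.natAbs 0).length ≠ 0 := by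
      simpa [List.length_eq_zero_iff] using hz
    simp [hz, this]
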